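-- pv_equiv track=rewrite | github.com/starrothkopf/aihlab_reddit | compare_adj_4_5_venn.py | prepare_adjective_data
-- ===== SOURCE A (Python) =====
-- def prepare_adjective_data(results, models, top_n):
--     """
--     returns:
--     - freq_dict[model][adj] = count
--     - unique[model] = {adj}
--     - common = {adj}
--     """
--
--     freq_dict = {}
--     sets = {}
--
--     for model in models:
--         items = results["top_adjectives_by_model"][model][:top_n]
--         freq_dict[model] = {adj: count for adj, count in items}
--         sets[model] = set(freq_dict[model].keys())
--
--     common = sets[models[0]] & sets[models[1]]
--     unique = {
--         models[0]: sets[models[0]] - sets[models[1]],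
--         models[1]: sets[models[1]] - sets[models[0]],
--     }
--
--     return freq_dict, unique, common
-- ===== SOURCE B (Python) =====
-- def prepare_adjective_data(results, models, top_n):
--     """
--     returns:
--     - freq_dict[model][adj] = count
--     - unique[model] = {adj}
--     - common = {adj}
--     """
--     table = results["top_adjectives_by_model"]
--     freq_dict = {model: dict(table[model][:top_n]) for model in models}
--     m0, m1 = models[0], models[1]
--     # single index: for each adjective a bitmask of which of the two models has it
--     owners = {}
--     for adj in freq_dict[m0]:
--         owners[adj] = 1
--     for adj in freq_dict[m1]:
--         owners[adj] = owners.get(adj, 0) | 2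
--     common, u0, u1 = set(), set(), set()
--     for adj, mask in owners.items():
--         if mask == 3:
--             common.add(adj)
--         elif mask == 1:
--             u0.add(adj)
--         else:
--             u1.add(adj)
--     return freq_dict, {m0: u0, m1: u1}, common
-- ===== Notes on version B (the rewrite author's own statement) =====
-- stated objective: alternative
-- what changed: Replaces A's key-set intersection and two set-differences by one owners index mapping each adjective to a bitmask of which of the two models has it, followed by a single classifying pass over that index (mask 3 -> common, 1 -> unique[models[0]], 2 -> unique[models[1]]); no set operations or cross-membership tests remain.
import Mathlib
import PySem

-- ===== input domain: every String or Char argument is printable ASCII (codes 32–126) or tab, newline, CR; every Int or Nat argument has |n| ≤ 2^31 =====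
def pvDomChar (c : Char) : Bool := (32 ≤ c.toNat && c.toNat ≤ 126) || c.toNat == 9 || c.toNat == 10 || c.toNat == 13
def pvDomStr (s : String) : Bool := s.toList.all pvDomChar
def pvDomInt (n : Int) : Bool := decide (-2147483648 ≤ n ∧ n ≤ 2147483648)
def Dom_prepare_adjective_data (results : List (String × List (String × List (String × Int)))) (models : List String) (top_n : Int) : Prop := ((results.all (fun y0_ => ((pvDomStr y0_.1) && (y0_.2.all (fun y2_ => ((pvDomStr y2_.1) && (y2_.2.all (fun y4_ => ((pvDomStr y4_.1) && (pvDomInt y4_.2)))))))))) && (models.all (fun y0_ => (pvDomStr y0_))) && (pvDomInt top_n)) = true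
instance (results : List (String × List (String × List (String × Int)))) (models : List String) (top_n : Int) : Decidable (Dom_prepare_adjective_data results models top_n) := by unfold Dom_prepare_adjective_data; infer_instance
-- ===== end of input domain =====

-- B replaces A's key-set intersection/difference pipeline by ONE owners index (adjective ->
-- bitmask of which of the two models has it) followed by a single classifying pass over the
-- index; no set intersections/differences and no membership tests against the other key list
-- are performed (objective: alternative decomposition, same cost).

-- ===== PORT A =====
def prepare_adjective_data (results : List (String × List (String × List (String × Int)))) (models : List String) (top_n : Int) : (List (String × List (String × Int))) × (List (String × List String)) × List String :=
  -- for model in models: freq_dict[model] = {...}; sets[model] = set(freq_dict[model].keys())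
  -- (missing keys / too-short models are excluded by Pre_; lookups use getD there)
  let tbl := (PySem.Dict.mk results).getD "top_adjectives_by_model" []
  let st := models.foldl
    (fun (st : PySem.Dict String (PySem.Dict String Int) × PySem.Dict String (PySem.Set String)) model =>
      (st.1.insert model (PySem.Dict.ofList (PySem.List.slice ((PySem.Dict.mk tbl).getD model []) none (some top_n))),
       st.2.insert model (PySem.Set.ofList (PySem.Dict.ofList (PySem.List.slice ((PySem.Dict.mk tbl).getD model []) none (some top_n))).keys)))
    (PySem.Dict.empty, PySem.Dict.empty)
  let m0 := PySem.List.pyGetD models 0 ""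
  let m1 := PySem.List.pyGetD models 1 ""
  let s0 := st.2.getD m0 []
  let s1 := st.2.getD m1 []
  let common := PySem.Set.inter s0 s1
  let unique := (PySem.Dict.empty.insert m0 (PySem.Set.diff s0 s1)).insert m1 (PySem.Set.diff s1 s0)
  (st.1.items.map (fun p => (p.1, p.2.items)), unique.items, common)

-- ===== PORT B =====
def prepare_adjective_data_alt (results : List (String × List (String × List (String × Int)))) (models : List String) (top_n : Int) : (List (String × List (String × Int))) × (List (String × List String)) × List String :=
  let tbl := (PySem.Dict.mk results).getD "top_adjectives_by_model" []
  -- freq_dict = {model: dict(table[model][:top_n]) for model in models}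
  let freq := models.foldl
    (fun (d : PySem.Dict String (PySem.Dict String Int)) model =>
      d.insert model (PySem.Dict.ofList (PySem.List.slice ((PySem.Dict.mk tbl).getD model []) none (some top_n))))
    PySem.Dict.empty
  let m0 := PySem.List.pyGetD models 0 ""
  let m1 := PySem.List.pyGetD models 1 ""
  -- owners = {}; for adj in freq_dict[m0]: owners[adj] = 1
  let owners0 := (freq.getD m0 PySem.Dict.empty).keys.foldl
    (fun (d : PySem.Dict String Int) adj => d.insert adj 1) PySem.Dict.empty
  -- for adj in freq_dict[m1]: owners[adj] = owners.get(adj, 0) | 2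
  let owners := (freq.getD m1 PySem.Dict.empty).keys.foldl
    (fun (d : PySem.Dict String Int) adj => d.insert adj (PySem.Int.bor (d.getD adj 0) 2)) owners0
  -- single classifying pass over owners.items()
  let cls := owners.items.foldl
    (fun (p : PySem.Set String × PySem.Set String × PySem.Set String) kv =>
      if kv.2 == 3 then (p.1.add kv.1, p.2.1, p.2.2)
      else if kv.2 == 1 then (p.1, p.2.1.add kv.1, p.2.2)
      else (p.1, p.2.1, p.2.2.add kv.1))
    (PySem.Set.empty, PySem.Set.empty, PySem.Set.empty)
  (freq.items.map (fun p => (p.1, p.2.items)),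
   ((PySem.Dict.empty.insert m0 cls.2.1).insert m1 cls.2.2).items, cls.1)

-- ===== PRECONDITION & SPEC =====
-- Pre_ excludes exactly the inputs where the Python A raises: a missing "top_adjectives_by_model"
-- key or a missing model key (KeyError), or fewer than two models (IndexError on models[1]).
def Pre_prepare_adjective_data (results : List (String × List (String × List (String × Int)))) (models : List String) (top_n : Int) : Prop :=
  2 ≤ models.length ∧
  (PySem.Dict.mk results).contains "top_adjectives_by_model" = true ∧
  ∀ m ∈ models, (PySem.Dict.mk ((PySem.Dict.mk results).getD "top_adjectives_by_model" [])).contains m = true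
instance (results : List (String × List (String × List (String × Int)))) (models : List String) (top_n : Int) : Decidable (Pre_prepare_adjective_data results models top_n) := by unfold Pre_prepare_adjective_data; infer_instance

def pvWitness_prepare_adjective_data : (List (String × List (String × List (String × Int)))) × List String × Int :=
  ([("top_adjectives_by_model", [("m1", [("good", 3), ("bad", 2)]), ("m2", [("bad", 1), ("new", 4)])])], ["m1", "m2"], 2)

def Spec_prepare_adjective_data (results : List (String × List (String × List (String × Int)))) (models : List String) (top_n : Int) (out : (List (String × List (String × Int))) × (List (String × List String)) × List String) : Prop := out = prepare_adjective_data_alt results models top_n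
instance (results : List (String × List (String × List (String × Int)))) (models : List String) (top_n : Int) (out : (List (String × List (String × Int))) × (List (String × List String)) × List String) : Decidable (Spec_prepare_adjective_data results models top_n out) := by unfold Spec_prepare_adjective_data; infer_instance

-- ===== CLAIM (what is proved, stated in full; the proofs are below) =====
def Claim_equal_prepare_adjective_data : Prop := ∀ (results : List (String × List (String × List (String × Int)))) (models : List String) (top_n : Int), Dom_prepare_adjective_data results models top_n → Pre_prepare_adjective_data results models top_n → Spec_prepare_adjective_data results models top_n (prepare_adjective_data results models top_n)

-- ===== LEMMAS AND PROOFS =====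

lemma set_contains_ofList (l : List String) (x : String) :
    PySem.Set.contains (PySem.Set.ofList l) x = l.contains x := by
  by_cases h : x ∈ l <;> simp [PySem.Set.contains, PySem.Set.mem_ofList, h]

lemma ofList_filter (l : List String) (c : String → Bool) :
    PySem.Set.ofList (l.filter c) = (PySem.Set.ofList l).filter c := by
  induction l using List.reverseRecOn with
  | nil => rfl
  | append_singleton xs x ih =>
      rw [List.filter_append, PySem.Set.ofList_append_singleton]
      by_cases hm : x ∈ PySem.Set.ofList xs <;> cases hc : c x <;>
        simp [PySem.Set.add, PySem.Set.ofList_append_singleton, List.filter_append,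
          List.mem_filter, hm, hc, ih]

-- A's paired fold: its first component is B's freq fold, its second stores ofList of the keys.
lemma pair_fold (F : String → PySem.Dict String Int) (models : List String)
    (d1 : PySem.Dict String (PySem.Dict String Int)) (d2 : PySem.Dict String (PySem.Set String))
    (h : ∀ k, d2.getD k [] = PySem.Set.ofList ((d1.getD k PySem.Dict.empty).keys)) :
    (models.foldl (fun st m => (st.1.insert m (F m), st.2.insert m (PySem.Set.ofList (F m).keys))) (d1, d2)).1
        = models.foldl (fun d m => d.insert m (F m)) d1 ∧
    ∀ k, (models.foldl (fun st m => (st.1.insert m (F m), st.2.insert m (PySem.Set.ofList (F m).keys))) (d1, d2)).2.getD k []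
        = PySem.Set.ofList (((models.foldl (fun d m => d.insert m (F m)) d1).getD k PySem.Dict.empty).keys) := by
  induction models generalizing d1 d2 with
  | nil => exact ⟨rfl, h⟩
  | cons m t ih =>
      refine ih _ _ ?_
      intro k
      rw [PySem.Dict.getD_insert, PySem.Dict.getD_insert]
      by_cases hk : k = m <;> simp [hk, h]

-- every per-model value of the freq fold has Nodup keys
lemma nodup_getD_keys (F : String → PySem.Dict String Int) (models : List String)
    (d : PySem.Dict String (PySem.Dict String Int))
    (hF : ∀ m, (F m).keys.Nodup) (hd : ∀ k, ((d.getD k PySem.Dict.empty).keys).Nodup) (k : String) :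
    (((models.foldl (fun d m => d.insert m (F m)) d).getD k PySem.Dict.empty).keys).Nodup := by
  induction models generalizing d with
  | nil => exact hd k
  | cons m t ih =>
      refine ih _ ?_
      intro k'
      rw [PySem.Dict.getD_insert]
      by_cases hk : k' = m <;> simp [hk, hF, hd]

-- owners phase 2: each key of k1 gets its stored mask OR 2 (in place), fresh keys append with mask 2
lemma owners_phase2 (k1 : List String) (d : PySem.Dict String Int)
    (hk1 : k1.Nodup) (hd : d.keys.Nodup) :
    (k1.foldl (fun (d : PySem.Dict String Int) adj => d.insert adj (PySem.Int.bor (d.getD adj 0) 2)) d).items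
      = d.items.map (fun p => if k1.contains p.1 then (p.1, PySem.Int.bor p.2 2) else p)
        ++ (k1.filter (fun a => !d.contains a)).map (fun a => (a, (2 : Int))) := by
  induction k1 generalizing d with
  | nil => simp
  | cons a t ih =>
      obtain ⟨ha, ht⟩ := List.nodup_cons.mp hk1
      have hstep := ih (d.insert a (PySem.Int.bor (d.getD a 0) 2)) ht (PySem.Dict.nodup_keys_insert _ _ _ hd)
      by_cases hc : d.contains a = true
      · rw [List.foldl_cons, hstep,
          PySem.Dict.items_insert_of_contains _ _ hc]
        rw [List.map_map]
        congr 1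
        · apply List.map_congr_left
          intro p hp
          have hv : d.getD p.1 0 = p.2 := PySem.Dict.getD_of_mem_items d hp hd 0
          by_cases hpa : p.1 = a
          · simp [Function.comp, hpa, hpa ▸ hv, ha]
          · simp [Function.comp, hpa]
        · rw [List.filter_cons_of_neg (by simp [hc])]
          apply congrArg
          apply List.filter_congr
          intro x hx
          have hxa : x ≠ a := fun h => ha (h ▸ hx)
          simp [PySem.Dict.contains_insert, hxa]
      · have hc' : d.contains a = false := by simpa using hc
        have hv : d.getD a 0 = 0 := PySem.Dict.getD_of_not_contains _ _ hc'
        rw [List.foldl_cons, hstep,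
          PySem.Dict.items_insert_of_not_contains _ _ hc', hv]
        have hfresh : ∀ p ∈ d.items, p.1 ≠ a := by
          intro p hp h
          have := PySem.Dict.mem_keys_of_mem_items d hp
          rw [h, ← PySem.Dict.contains_iff_mem_keys] at this
          simp [hc'] at this
        rw [List.map_append, List.filter_cons_of_pos (by simp [hc'])]
        have h2 : PySem.Int.bor 0 2 = 2 := by decide
        have hmap : d.items.map (fun p => if t.contains p.1 then (p.1, PySem.Int.bor p.2 2) else p)
            = d.items.map (fun p => if (a :: t).contains p.1 then (p.1, PySem.Int.bor p.2 2) else p) := by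
          apply List.map_congr_left
          intro p hp
          simp [hfresh p hp]
        have hfil : t.filter (fun x => !(d.insert a (PySem.Int.bor 0 2)).contains x)
            = t.filter (fun x => !d.contains x) := by
          apply List.filter_congr
          intro x hx
          have hxa : x ≠ a := fun h => ha (h ▸ hx)
          simp [PySem.Dict.contains_insert, hxa]
        rw [hfil, ← hmap]
        simp [ha, h2]

-- the classifying pass over entries tagged (if c a then 3 else 1) splits k0 by c
lemma classify_masked (k0 : List String) (c : String → Bool)
    (x y z : PySem.Set String) :
    (k0.map (fun a => (a, if c a then (3 : Int) else 1))).foldl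
        (fun (p : PySem.Set String × PySem.Set String × PySem.Set String) kv =>
          if kv.2 == 3 then (p.1.add kv.1, p.2.1, p.2.2)
          else if kv.2 == 1 then (p.1, p.2.1.add kv.1, p.2.2)
          else (p.1, p.2.1, p.2.2.add kv.1)) (x, y, z)
      = (PySem.Set.update x (k0.filter c), PySem.Set.update y (k0.filter (fun a => !c a)), z) := by
  induction k0 generalizing x y with
  | nil => simp [PySem.Set.update_nil]
  | cons a t ih =>
      cases hc : c a
      · rw [List.map_cons, hc, if_neg (by simp), List.foldl_cons,
          List.filter_cons_of_neg (by simp [hc]), List.filter_cons_of_pos (by simp [hc]),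
          PySem.Set.update_cons]
        exact ih x (y.add a)
      · rw [List.map_cons, hc, if_pos rfl, List.foldl_cons,
          List.filter_cons_of_pos (by simp [hc]), List.filter_cons_of_neg (by simp [hc]),
          PySem.Set.update_cons]
        exact ih (x.add a) y

-- the classifying pass over entries tagged 2 collects them all into the third set
lemma classify_two (k : List String) (x y z : PySem.Set String) :
    (k.map (fun a => (a, (2 : Int)))).foldl
        (fun (p : PySem.Set String × PySem.Set String × PySem.Set String) kv =>
          if kv.2 == 3 then (p.1.add kv.1, p.2.1, p.2.2)
          else if kv.2 == 1 then (p.1, p.2.1.add kv.1, p.2.2)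
          else (p.1, p.2.1, p.2.2.add kv.1)) (x, y, z)
      = (x, y, PySem.Set.update z k) := by
  induction k generalizing z with
  | nil => simp [PySem.Set.update_nil]
  | cons a t ih =>
      rw [List.map_cons, List.foldl_cons, PySem.Set.update_cons]
      exact ih (z.add a)

-- the whole tail of both programs, for an abstract per-model freq table F
lemma main_core (F : String → PySem.Dict String Int) (hFnd : ∀ m, (F m).keys.Nodup)
    (models : List String) (m0 m1 : String) :
    (let st := models.foldl
        (fun (st : PySem.Dict String (PySem.Dict String Int) × PySem.Dict String (PySem.Set String)) m =>
          (st.1.insert m (F m), st.2.insert m (PySem.Set.ofList (F m).keys)))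
        (PySem.Dict.empty, PySem.Dict.empty);
     let s0 := st.2.getD m0 [];
     let s1 := st.2.getD m1 [];
     (st.1.items.map (fun p => (p.1, p.2.items)),
      ((PySem.Dict.empty.insert m0 (PySem.Set.diff s0 s1)).insert m1 (PySem.Set.diff s1 s0)).items,
      PySem.Set.inter s0 s1))
    = (let freq := models.foldl
        (fun (d : PySem.Dict String (PySem.Dict String Int)) m => d.insert m (F m)) PySem.Dict.empty;
       let owners0 := (freq.getD m0 PySem.Dict.empty).keys.foldl
        (fun (d : PySem.Dict String Int) adj => d.insert adj 1) PySem.Dict.empty;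
       let owners := (freq.getD m1 PySem.Dict.empty).keys.foldl
        (fun (d : PySem.Dict String Int) adj => d.insert adj (PySem.Int.bor (d.getD adj 0) 2)) owners0;
       let cls := owners.items.foldl
        (fun (p : PySem.Set String × PySem.Set String × PySem.Set String) kv =>
          if kv.2 == 3 then (p.1.add kv.1, p.2.1, p.2.2)
          else if kv.2 == 1 then (p.1, p.2.1.add kv.1, p.2.2)
          else (p.1, p.2.1, p.2.2.add kv.1))
        (PySem.Set.empty, PySem.Set.empty, PySem.Set.empty);
       (freq.items.map (fun p => (p.1, p.2.items)),
        ((PySem.Dict.empty.insert m0 cls.2.1).insert m1 cls.2.2).items, cls.1)) := by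
  dsimp only
  obtain ⟨h1, h2⟩ := pair_fold F models PySem.Dict.empty PySem.Dict.empty (fun k => rfl)
  set freq := models.foldl (fun (d : PySem.Dict String (PySem.Dict String Int)) m => d.insert m (F m)) PySem.Dict.empty with hfreq
  set k0 := (freq.getD m0 PySem.Dict.empty).keys with hk0
  set k1 := (freq.getD m1 PySem.Dict.empty).keys with hk1
  have hnd0 : k0.Nodup := nodup_getD_keys F models PySem.Dict.empty hFnd
    (fun k => by simp) m0
  have hnd1 : k1.Nodup := nodup_getD_keys F models PySem.Dict.empty hFnd
    (fun k => by simp) m1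
  -- phase 1: owners after the first loop has items k0.map (·, 1)
  have hph1 : (k0.foldl (fun (d : PySem.Dict String Int) adj => d.insert adj 1) PySem.Dict.empty).items
      = k0.map (fun a => (a, (1 : Int))) := by
    have := PySem.Dict.items_foldl_insert_fresh (l := k0) (k := id) (v := fun _ => (1 : Int))
      (d := PySem.Dict.empty) (by intro a _; simp) (by simpa using hnd0)
    simpa using this
  have hnd1' : (k0.foldl (fun (d : PySem.Dict String Int) adj => d.insert adj 1) PySem.Dict.empty).keys.Nodup :=
    PySem.Dict.nodup_keys_foldl_insert _ _ _ (by simp [PySem.Dict.nodup_keys_empty])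
  have hcont : ∀ x, (k0.foldl (fun (d : PySem.Dict String Int) adj => d.insert adj 1) PySem.Dict.empty).contains x
      = k0.contains x := by
    intro x
    rw [PySem.Dict.contains_eq_decide_mem_keys, PySem.Dict.keys_foldl_insert]
    rw [show PySem.Set.update (PySem.Dict.empty : PySem.Dict String Int).keys k0
        = PySem.Set.ofList k0 from PySem.Set.update_empty k0]
    simp [PySem.Set.mem_ofList]
  -- phase 2: owners items
  have hph2 := owners_phase2 k1 _ hnd1 hnd1'
  rw [hph1] at hph2
  have hb3 : PySem.Int.bor 1 2 = 3 := by decide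
  have howners : (k1.foldl (fun (d : PySem.Dict String Int) adj =>
        d.insert adj (PySem.Int.bor (d.getD adj 0) 2))
        (k0.foldl (fun (d : PySem.Dict String Int) adj => d.insert adj 1) PySem.Dict.empty)).items
      = k0.map (fun a => (a, if k1.contains a then (3 : Int) else 1))
        ++ (k1.filter (fun a => !k0.contains a)).map (fun a => (a, (2 : Int))) := by
    rw [hph2, List.map_map]
    congr 1
    · apply List.map_congr_left
      intro a _
      by_cases h : a ∈ k1 <;> simp [Function.comp, h, hb3]
    · apply congrArg
      apply List.filter_congr
      intro x _
      rw [hcont]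
  simp only [h1, h2, howners, List.foldl_append, classify_masked, classify_two,
    PySem.Set.update_empty, ofList_filter, PySem.Set.inter, PySem.Set.diff, set_contains_ofList]
  rfl

-- ===== VERDICT (by name: the statement is the Claim_ definition above) =====
theorem prepare_adjective_data_spec : Claim_equal_prepare_adjective_data := by
  intro results models top_n _ _
  unfold Spec_prepare_adjective_data prepare_adjective_data prepare_adjective_data_alt
  exact main_core
    (fun model => PySem.Dict.ofList (PySem.List.slice ((PySem.Dict.mk ((PySem.Dict.mk results).getD "top_adjectives_by_model" [])).getD model []) none (some top_n)))
    (fun m => PySem.Dict.nodup_keys_ofList _) models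
    (PySem.List.pyGetD models 0 "") (PySem.List.pyGetD models 1 "")
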